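-- pv_equiv track=rewrite | github.com/manwar/perlweeklychallenge-club | challenge-127/roger-bell-west/python/ch-2.py | ci
-- ===== SOURCE A (Python) =====
-- def ci(a):
--   o=list()
--   for i in range(1,len(a)):
--     for j in range(i):
--       if (a[i][0] >= a[j][0] and a[i][0] <= a[j][1]) or (a[i][1] >= a[j][0] and a[i][1] <= a[j][1]) or (a[i][0] <= a[j][0] and a[i][1] >= a[j][1]):
--         o.append(a[i])
--         break
--   return o
-- ===== SOURCE B (Python) =====
-- # Same selection, but instead of re-scanning all earlier intervals with the three-clause
-- # test, maintain (1) the merged union of earlier well-formed intervals for the two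
-- # point-stabbing clauses and (2) a dominance-pruned set of earlier (start, end) pairs for
-- # the containment clause; each interval is tested against these pruned structures.
--
-- def _covers(merged, p):
--     return any(s <= p <= e for (s, e) in merged)
--
-- def _quad(stair, lo, hi):
--     return any(lo <= p and q <= hi for (p, q) in stair)
--
-- def _insert(merged, lo, hi):
--     keep = []
--     s, e = lo, hi
--     for iv in merged:
--         if iv[0] <= hi and lo <= iv[1]:
--             s = min(s, iv[0])
--             e = max(e, iv[1])
--         else:
--             keep.append(iv)
--     keep.append((s, e))
--     return keep
--
-- def _stair_insert(stair, lo, hi):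
--     if _quad(stair, lo, hi):
--         return stair
--     return [pt for pt in stair if not (pt[0] <= lo and hi <= pt[1])] + [(lo, hi)]
--
-- def ci(a):
--     merged = []   # disjoint well-formed intervals; union = union of earlier well-formed intervals
--     stair = []    # undominated earlier (start, end) pairs, for the containment clause
--     out = []
--     for x in a:
--         lo, hi = x[0], x[1]
--         if _covers(merged, lo) or _covers(merged, hi) or _quad(stair, lo, hi):
--             out.append(x)
--         if lo <= hi:
--             merged = _insert(merged, lo, hi)
--         stair = _stair_insert(stair, lo, hi)
--     return out
-- ===== Notes on version B (the rewrite author's own statement) =====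
-- stated objective: alternative
-- what changed: Replaces A's nested index scan with its three-clause test by a single pass that maintains a merged union of the earlier well-formed intervals (answering the two point-stabbing clauses) and a dominance-pruned set of earlier endpoint pairs (answering the containment clause), so each interval is tested against pruned structures instead of every earlier interval.
-- outside the precondition, e.g. on ci([[5]]): A returns [], B raises IndexError; on ci([[0, 5], [1]]): A returns [[1]], B raises IndexError
import Mathlib
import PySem

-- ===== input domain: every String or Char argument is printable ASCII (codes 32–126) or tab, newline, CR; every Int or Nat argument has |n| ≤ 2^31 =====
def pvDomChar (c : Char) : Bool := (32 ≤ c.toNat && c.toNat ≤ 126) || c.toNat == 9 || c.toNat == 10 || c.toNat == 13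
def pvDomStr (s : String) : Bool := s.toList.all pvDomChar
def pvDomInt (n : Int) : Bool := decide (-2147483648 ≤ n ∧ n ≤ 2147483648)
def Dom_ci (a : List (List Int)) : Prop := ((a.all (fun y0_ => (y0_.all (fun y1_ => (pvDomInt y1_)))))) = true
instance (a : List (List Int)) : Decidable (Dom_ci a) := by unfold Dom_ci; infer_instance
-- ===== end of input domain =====

-- B replaces A's rescans of all earlier intervals by a merged union of the earlier
-- well-formed intervals plus a dominance-pruned set of earlier endpoint pairs
-- (objective: alternative algorithm; return value only, no mutation involved).

-- ===== PORT A =====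
-- A's three-clause overlap test on a[i], a[j]
def pvCondA (ai aj : List Int) : Bool :=
  (PySem.List.pyGetD ai 0 0 ≥ PySem.List.pyGetD aj 0 0 && PySem.List.pyGetD ai 0 0 ≤ PySem.List.pyGetD aj 1 0) ||
  (PySem.List.pyGetD ai 1 0 ≥ PySem.List.pyGetD aj 0 0 && PySem.List.pyGetD ai 1 0 ≤ PySem.List.pyGetD aj 1 0) ||
  (PySem.List.pyGetD ai 0 0 ≤ PySem.List.pyGetD aj 0 0 && PySem.List.pyGetD ai 1 0 ≥ PySem.List.pyGetD aj 1 0)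

-- inner 'for j in range(i): … append; break'
def pvInnerA (a : List (List Int)) (ai : List Int) (js : List Int) (o : List (List Int)) : List (List Int) :=
  match js with
  | [] => o
  | j :: rest =>
      if pvCondA ai (PySem.List.pyGetD a j []) then o ++ [ai]
      else pvInnerA a ai rest o

def ci (a : List (List Int)) : List (List Int) :=
  (PySem.List.pyRange 1 (a.length : Int) 1).foldl
    (fun o i => pvInnerA a (PySem.List.pyGetD a i []) (PySem.List.pyRange 0 i 1) o) []

-- ===== PORT B =====
def pvCovers (m : List (Int × Int)) (p : Int) : Bool := m.any (fun iv => iv.1 ≤ p && p ≤ iv.2)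

def pvQuad (st : List (Int × Int)) (lo hi : Int) : Bool := st.any (fun pt => lo ≤ pt.1 && pt.2 ≤ hi)

-- _insert: merge [lo,hi] with every stored interval meeting it, keep the rest
def pvInsGo (lo hi : Int) (m keep : List (Int × Int)) (s e : Int) : List (Int × Int) :=
  match m with
  | [] => keep ++ [(s, e)]
  | iv :: rest =>
      if iv.1 ≤ hi && lo ≤ iv.2 then pvInsGo lo hi rest keep (min s iv.1) (max e iv.2)
      else pvInsGo lo hi rest (keep ++ [iv]) s e

def pvInsert (m : List (Int × Int)) (lo hi : Int) : List (Int × Int) := pvInsGo lo hi m [] lo hi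

def pvStairInsert (st : List (Int × Int)) (lo hi : Int) : List (Int × Int) :=
  if pvQuad st lo hi then st
  else st.filter (fun pt => !(pt.1 ≤ lo && hi ≤ pt.2)) ++ [(lo, hi)]

def pvStepB (acc : List (Int × Int) × List (Int × Int) × List (List Int)) (x : List Int) :
    List (Int × Int) × List (Int × Int) × List (List Int) :=
  let merged := acc.1
  let stair := acc.2.1
  let out := acc.2.2
  let lo := PySem.List.pyGetD x 0 0
  let hi := PySem.List.pyGetD x 1 0
  let out' := if pvCovers merged lo || pvCovers merged hi || pvQuad stair lo hi then out ++ [x] else out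
  let merged' := if lo ≤ hi then pvInsert merged lo hi else merged
  (merged', pvStairInsert stair lo hi, out')

def ci_alt (a : List (List Int)) : List (List Int) :=
  (a.foldl pvStepB ([], [], [])).2.2

-- ===== PRECONDITION & SPEC =====
-- Pre_ excludes inputs containing an interval with fewer than two endpoints: A usually
-- raises IndexError there (and when short-circuit evaluation lets it return, only one
-- endpoint was read), while B reads both endpoints of every interval and raises.
def Pre_ci (a : List (List Int)) : Prop := ∀ x ∈ a, 2 ≤ x.length
instance (a : List (List Int)) : Decidable (Pre_ci a) := by unfold Pre_ci; infer_instance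

def pvWitness_ci : List (List Int) := [[0, 2], [1, 5], [10, 12]]

def Spec_ci (a : List (List Int)) (out : List (List Int)) : Prop := out = ci_alt a
instance (a : List (List Int)) (out : List (List Int)) : Decidable (Spec_ci a out) := by unfold Spec_ci; infer_instance

-- ===== CLAIM (what is proved, stated in full; the proofs are below) =====
def Claim_equal_ci : Prop := ∀ (a : List (List Int)), Dom_ci a → Pre_ci a → Spec_ci a (ci a)

-- ===== LEMMAS AND PROOFS =====

-- reference form: left-to-right scan keeping each element overlapping some earlier one
def pvRef (prior rest : List (List Int)) : List (List Int) :=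
  match rest with
  | [] => []
  | x :: r => (if prior.any (fun y => pvCondA x y) then [x] else []) ++ pvRef (prior ++ [x]) r

lemma pvInnerA_eq (a : List (List Int)) (ai : List Int) (js : List Int) (o : List (List Int)) :
    pvInnerA a ai js o =
      if js.any (fun j => pvCondA ai (PySem.List.pyGetD a j [])) then o ++ [ai] else o := by
  induction js with
  | nil => simp [pvInnerA]
  | cons j rest ih =>
      by_cases h : pvCondA ai (PySem.List.pyGetD a j []) = true
      · simp [pvInnerA, h]
      · simp [pvInnerA, h, ih]

lemma pvAnyRange (a : List (List Int)) (ai : List Int) (k : Nat) (hk : k ≤ a.length) :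
    (PySem.List.pyRange 0 (k : Int) 1).any (fun j => pvCondA ai (PySem.List.pyGetD a j [])) =
      (a.take k).any (fun y => pvCondA ai y) := by
  induction k with
  | zero => simp [PySem.List.pyRange_one_eq_nil]
  | succ n ih =>
      have hn : n ≤ a.length := Nat.le_of_succ_le hk
      have hlt : n < a.length := hk
      have hsplit : PySem.List.pyRange 0 ((n + 1 : Nat) : Int) 1 =
          PySem.List.pyRange 0 (n : Int) 1 ++ [(n : Int)] := by
        push_cast
        exact PySem.List.pyRange_one_succ_right (by positivity)
      rw [hsplit, List.any_append, ih hn]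
      have hgd : PySem.List.pyGetD a (n : Int) [] = a[n] := by
        rw [PySem.List.pyGetD_natCast]
        simp [List.getD_eq_getElem?_getD, List.getElem?_eq_getElem hlt]
      rw [List.take_succ, List.getElem?_eq_getElem hlt, Option.toList_some, List.any_append]
      simp only [List.any_cons, List.any_nil, Bool.or_false, hgd]

lemma pvALoop (a : List (List Int)) : ∀ (d : Nat) (k : Nat) (o : List (List Int)),
    a.length - k = d → 1 ≤ k → k ≤ a.length →
    (PySem.List.pyRange (k : Int) (a.length : Int) 1).foldl
        (fun o i => pvInnerA a (PySem.List.pyGetD a i []) (PySem.List.pyRange 0 i 1) o) o =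
      o ++ pvRef (a.take k) (a.drop k) := by
  intro d
  induction d with
  | zero =>
      intro k o hd _ hk
      have hke : k = a.length := by omega
      subst hke
      rw [PySem.List.pyRange_one_eq_nil (le_refl _), List.foldl_nil, List.drop_length]
      simp [pvRef]
  | succ n ih =>
      intro k o hd h1 hk
      have hlt : k < a.length := by omega
      have hcons : PySem.List.pyRange (k : Int) (a.length : Int) 1 =
          (k : Int) :: PySem.List.pyRange ((k : Int) + 1) (a.length : Int) 1 :=
        PySem.List.pyRange_one_cons (by exact_mod_cast hlt)
      rw [hcons, List.foldl_cons]
      have hgd : PySem.List.pyGetD a (k : Int) [] = a[k] := by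
        rw [PySem.List.pyGetD_natCast]
        simp [List.getD_eq_getElem?_getD, List.getElem?_eq_getElem hlt]
      have hstep : pvInnerA a (PySem.List.pyGetD a (k : Int) [])
            (PySem.List.pyRange 0 (k : Int) 1) o =
          (o ++ if (a.take k).any (fun y => pvCondA a[k] y) then [a[k]] else []) := by
        rw [pvInnerA_eq, pvAnyRange a _ k (le_of_lt hlt), hgd]
        by_cases h : (a.take k).any (fun y => pvCondA a[k] y) = true
        · simp [h]
        · simp [h]
      rw [hstep]
      have hcast : ((k : Int) + 1) = ((k + 1 : Nat) : Int) := by push_cast; ring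
      rw [hcast, ih (k + 1) _ (by omega) (by omega) (by omega)]
      have hdk : a.drop k = a[k] :: a.drop (k + 1) := by
        exact (List.drop_eq_getElem_cons hlt)
      have htk : a.take (k + 1) = a.take k ++ [a[k]] := by
        rw [List.take_succ, List.getElem?_eq_getElem hlt, Option.toList_some]
      rw [List.append_assoc]
      congr 1
      rw [hdk]
      show (if (a.take k).any (fun y => pvCondA a[k] y) then [a[k]] else []) ++
          pvRef (a.take (k + 1)) (a.drop (k + 1)) = pvRef (a.take k) (a[k] :: a.drop (k + 1))
      rw [htk]
      rfl

lemma ci_eq_ref (a : List (List Int)) : ci a = pvRef [] a := by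
  cases a with
  | nil => simp [ci, pvRef, PySem.List.pyRange_one_eq_nil]
  | cons x r =>
      have h := pvALoop (x :: r) ((x :: r).length - 1) 1 [] rfl (le_refl 1) (by simp)
      rw [Nat.cast_one] at h
      unfold ci
      rw [h]
      simp [pvRef]

-- B side
lemma pvBOut (l : List (List Int)) :
    ∀ (acc : List (Int × Int) × List (Int × Int) × List (List Int)),
    (l.foldl pvStepB acc).2.2 = acc.2.2 ++ (l.foldl pvStepB (acc.1, acc.2.1, [])).2.2 := by
  induction l with
  | nil => intro acc; simp
  | cons x r ih =>
      intro acc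
      obtain ⟨m, st, out⟩ := acc
      rw [List.foldl_cons, List.foldl_cons]
      rw [ih, ih (pvStepB (m, st, []) x)]
      have h1 : (pvStepB (m, st, out) x).1 = (pvStepB (m, st, []) x).1 := rfl
      have h2 : (pvStepB (m, st, out) x).2.1 = (pvStepB (m, st, []) x).2.1 := rfl
      have h3 : (pvStepB (m, st, out) x).2.2 = out ++ (pvStepB (m, st, []) x).2.2 := by
        simp only [pvStepB]
        split_ifs <;> simp
      rw [h1, h2, h3, List.append_assoc]

lemma pvCondA_iff (x y : List Int) :
    pvCondA x y = true ↔
      ((PySem.List.pyGetD y 0 0 ≤ PySem.List.pyGetD y 1 0 ∧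
          ((PySem.List.pyGetD y 0 0 ≤ PySem.List.pyGetD x 0 0 ∧ PySem.List.pyGetD x 0 0 ≤ PySem.List.pyGetD y 1 0) ∨
           (PySem.List.pyGetD y 0 0 ≤ PySem.List.pyGetD x 1 0 ∧ PySem.List.pyGetD x 1 0 ≤ PySem.List.pyGetD y 1 0))) ∨
        (PySem.List.pyGetD x 0 0 ≤ PySem.List.pyGetD y 0 0 ∧ PySem.List.pyGetD y 1 0 ≤ PySem.List.pyGetD x 1 0)) := by
  simp only [pvCondA, Bool.or_eq_true, Bool.and_eq_true, decide_eq_true_eq, ge_iff_le]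
  omega

set_option maxHeartbeats 1000000 in
lemma pvInsGo_covers (lo hi : Int) : ∀ (m keep : List (Int × Int)) (s e p : Int),
    (∀ iv ∈ m, iv.1 ≤ iv.2) → s ≤ lo → hi ≤ e → s ≤ e →
    (pvCovers (pvInsGo lo hi m keep s e) p = true ↔
      pvCovers keep p = true ∨ pvCovers m p = true ∨ (s ≤ p ∧ p ≤ e)) := by
  intro m
  induction m with
  | nil =>
      intro keep s e p _ _ _ _
      simp [pvInsGo, pvCovers, List.any_append]
  | cons iv rest ih =>
      intro keep s e p hwf hs he hse
      have hivwf : iv.1 ≤ iv.2 := hwf iv (by simp)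
      have hrest : ∀ j ∈ rest, j.1 ≤ j.2 := fun j hj => hwf j (by simp [hj])
      by_cases hov : (iv.1 ≤ hi && lo ≤ iv.2) = true
      · have hov' : iv.1 ≤ hi ∧ lo ≤ iv.2 := by simpa using hov
        rw [pvInsGo, if_pos hov]
        rw [ih keep (min s iv.1) (max e iv.2) p hrest (le_trans (min_le_left _ _) hs)
          (le_trans he (le_max_left _ _)) (by omega)]
        have harith : (min s iv.1 ≤ p ∧ p ≤ max e iv.2) ↔
            ((iv.1 ≤ p ∧ p ≤ iv.2) ∨ (s ≤ p ∧ p ≤ e)) := by omega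
        have hcons : pvCovers (iv :: rest) p = true ↔
            ((iv.1 ≤ p ∧ p ≤ iv.2) ∨ pvCovers rest p = true) := by
          simp [pvCovers]
        rw [harith, hcons]
        tauto
      · rw [pvInsGo, if_neg hov]
        rw [ih (keep ++ [iv]) s e p hrest hs he hse]
        have hkeep : pvCovers (keep ++ [iv]) p = true ↔
            (pvCovers keep p = true ∨ (iv.1 ≤ p ∧ p ≤ iv.2)) := by
          simp [pvCovers, List.any_append]
        have hcons : pvCovers (iv :: rest) p = true ↔
            ((iv.1 ≤ p ∧ p ≤ iv.2) ∨ pvCovers rest p = true) := by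
          simp [pvCovers]
        rw [hkeep, hcons]
        tauto

lemma pvInsGo_wf (lo hi : Int) : ∀ (m keep : List (Int × Int)) (s e : Int),
    (∀ iv ∈ m, iv.1 ≤ iv.2) → (∀ iv ∈ keep, iv.1 ≤ iv.2) → s ≤ e →
    ∀ iv ∈ pvInsGo lo hi m keep s e, iv.1 ≤ iv.2 := by
  intro m
  induction m with
  | nil =>
      intro keep s e _ hkeep hse iv hiv
      rw [pvInsGo] at hiv
      rcases List.mem_append.mp hiv with h | h
      · exact hkeep iv h
      · simp at h; simp [h, hse]
  | cons j rest ih =>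
      intro keep s e hwf hkeep hse iv hiv
      have hjwf : j.1 ≤ j.2 := hwf j (by simp)
      have hrest : ∀ k ∈ rest, k.1 ≤ k.2 := fun k hk => hwf k (by simp [hk])
      rw [pvInsGo] at hiv
      by_cases hov : (j.1 ≤ hi && lo ≤ j.2) = true
      · rw [if_pos hov] at hiv
        exact ih keep _ _ hrest hkeep (by omega) iv hiv
      · rw [if_neg hov] at hiv
        refine ih (keep ++ [j]) s e hrest ?_ hse iv hiv
        intro k hk
        rcases List.mem_append.mp hk with h | h
        · exact hkeep k h
        · simp at h; simp [h, hjwf]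

lemma pvStairInsert_quad (st : List (Int × Int)) (lo hi LO HI : Int) :
    pvQuad (pvStairInsert st lo hi) LO HI = true ↔
      (pvQuad st LO HI = true ∨ (LO ≤ lo ∧ hi ≤ HI)) := by
  by_cases hdom : pvQuad st lo hi = true
  · rw [pvStairInsert, if_pos hdom]
    constructor
    · intro h; exact Or.inl h
    · rintro (h | ⟨h1, h2⟩)
      · exact h
      · rcases List.any_eq_true.mp hdom with ⟨pt, hmem, hpt⟩
        simp only [Bool.and_eq_true, decide_eq_true_eq] at hpt
        exact List.any_eq_true.mpr ⟨pt, hmem, by simp; omega⟩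
  · rw [pvStairInsert, if_neg hdom]
    simp only [pvQuad, List.any_append, List.any_filter, Bool.or_eq_true, List.any_eq_true,
      Bool.and_eq_true, decide_eq_true_eq, Bool.not_eq_true', Bool.and_eq_false_iff,
      decide_eq_false_iff_not, not_le, List.any_cons, List.any_nil, Bool.or_false]
    constructor
    · rintro (⟨pt, hmem, hcond⟩ | h)
      · rcases hcond with ⟨_, h2⟩
        exact Or.inl ⟨pt, hmem, h2⟩
      · right; omega
    · rintro (⟨pt, hmem, h1, h2⟩ | h)
      · by_cases hd : pt.1 ≤ lo ∧ hi ≤ pt.2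
        · right; constructor <;> omega
        · left
          refine ⟨pt, hmem, ?_, h1, h2⟩
          omega
      · right; omega

-- shorthand for the invariants
def pvInvCov (m : List (Int × Int)) (prior : List (List Int)) : Prop :=
  ∀ p : Int, pvCovers m p = true ↔
    ∃ y ∈ prior, PySem.List.pyGetD y 0 0 ≤ PySem.List.pyGetD y 1 0 ∧
      PySem.List.pyGetD y 0 0 ≤ p ∧ p ≤ PySem.List.pyGetD y 1 0

def pvInvQuad (st : List (Int × Int)) (prior : List (List Int)) : Prop :=
  ∀ lo hi : Int, pvQuad st lo hi = true ↔
    ∃ y ∈ prior, lo ≤ PySem.List.pyGetD y 0 0 ∧ PySem.List.pyGetD y 1 0 ≤ hi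

lemma pvBMain : ∀ (rest prior : List (List Int)) (m st : List (Int × Int)),
    (∀ iv ∈ m, iv.1 ≤ iv.2) → pvInvCov m prior → pvInvQuad st prior →
    (rest.foldl pvStepB (m, st, [])).2.2 = pvRef prior rest := by
  intro rest
  induction rest with
  | nil => intro prior m st _ _ _; rfl
  | cons x r ih =>
      intro prior m st hwf hcov hquad
      set lo := PySem.List.pyGetD x 0 0 with hlo
      set hi := PySem.List.pyGetD x 1 0 with hhi
      -- the B-side test equals A's scan of prior
      have htest : (pvCovers m lo || pvCovers m hi || pvQuad st lo hi) =
          prior.any (fun y => pvCondA x y) := by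
        rw [Bool.eq_iff_iff]
        simp only [Bool.or_eq_true]
        rw [List.any_eq_true]
        constructor
        · rintro ((h | h) | h)
          · rcases (hcov lo).mp h with ⟨y, hy, hwfy, h1, h2⟩
            exact ⟨y, hy, (pvCondA_iff x y).mpr (Or.inl ⟨hwfy, Or.inl ⟨h1, h2⟩⟩)⟩
          · rcases (hcov hi).mp h with ⟨y, hy, hwfy, h1, h2⟩
            exact ⟨y, hy, (pvCondA_iff x y).mpr (Or.inl ⟨hwfy, Or.inr ⟨h1, h2⟩⟩)⟩
          · rcases (hquad lo hi).mp h with ⟨y, hy, h1, h2⟩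
            exact ⟨y, hy, (pvCondA_iff x y).mpr (Or.inr ⟨h1, h2⟩)⟩
        · rintro ⟨y, hy, hcond⟩
          rcases (pvCondA_iff x y).mp hcond with ⟨hwfy, hc | hc⟩ | hc
          · exact Or.inl (Or.inl ((hcov lo).mpr ⟨y, hy, hwfy, hc⟩))
          · exact Or.inl (Or.inr ((hcov hi).mpr ⟨y, hy, hwfy, hc⟩))
          · exact Or.inr ((hquad lo hi).mpr ⟨y, hy, hc⟩)
      -- state after this step
      have hstep : pvStepB (m, st, ([] : List (List Int))) x =
          ((if lo ≤ hi then pvInsert m lo hi else m), pvStairInsert st lo hi,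
            (if prior.any (fun y => pvCondA x y) then [x] else [])) := by
        simp only [pvStepB]
        rw [← hlo, ← hhi, htest]
        split_ifs <;> simp
      rw [List.foldl_cons, hstep, pvBOut]
      dsimp only
      -- invariants for the next state
      have hwf' : ∀ iv ∈ (if lo ≤ hi then pvInsert m lo hi else m), iv.1 ≤ iv.2 := by
        by_cases h : lo ≤ hi
        · rw [if_pos h]
          exact pvInsGo_wf lo hi m [] lo hi hwf (by simp) h
        · rw [if_neg h]; exact hwf
      have hcov' : pvInvCov (if lo ≤ hi then pvInsert m lo hi else m) (prior ++ [x]) := by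
        intro p
        have hr : (∃ y ∈ prior ++ [x], PySem.List.pyGetD y 0 0 ≤ PySem.List.pyGetD y 1 0 ∧
            PySem.List.pyGetD y 0 0 ≤ p ∧ p ≤ PySem.List.pyGetD y 1 0) ↔
            ((∃ y ∈ prior, PySem.List.pyGetD y 0 0 ≤ PySem.List.pyGetD y 1 0 ∧
              PySem.List.pyGetD y 0 0 ≤ p ∧ p ≤ PySem.List.pyGetD y 1 0) ∨
             (lo ≤ hi ∧ lo ≤ p ∧ p ≤ hi)) := by
          simp only [List.mem_append, List.mem_singleton]
          constructor
          · rintro ⟨y, hy | hy, hc⟩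
            · exact Or.inl ⟨y, hy, hc⟩
            · subst hy; exact Or.inr hc
          · rintro (⟨y, hy, hc⟩ | hc)
            · exact ⟨y, Or.inl hy, hc⟩
            · exact ⟨x, Or.inr rfl, hc⟩
        rw [hr]
        by_cases h : lo ≤ hi
        · rw [if_pos h, pvInsert,
            pvInsGo_covers lo hi m [] lo hi p hwf (le_refl lo) (le_refl hi) h, hcov p]
          simp only [pvCovers, List.any_nil]
          constructor
          · rintro (h0 | hold | hp)
            · exact absurd h0 (by simp)
            · exact Or.inl hold
            · exact Or.inr ⟨h, hp⟩
          · rintro (hold | ⟨_, hp⟩)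
            · exact Or.inr (Or.inl hold)
            · exact Or.inr (Or.inr hp)
        · rw [if_neg h, hcov p]
          constructor
          · intro hold; exact Or.inl hold
          · rintro (hold | ⟨hc, _⟩)
            · exact hold
            · exact absurd hc h
      have hquad' : pvInvQuad (pvStairInsert st lo hi) (prior ++ [x]) := by
        intro LO HI
        rw [pvStairInsert_quad st lo hi LO HI, hquad LO HI]
        simp only [List.mem_append, List.mem_singleton]
        constructor
        · rintro (⟨y, hy, hc⟩ | hc)
          · exact ⟨y, Or.inl hy, hc⟩
          · exact ⟨x, Or.inr rfl, hc⟩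
        · rintro ⟨y, hy | hy, hc⟩
          · exact Or.inl ⟨y, hy, hc⟩
          · subst hy; exact Or.inr hc
      rw [ih (prior ++ [x]) _ _ hwf' hcov' hquad']
      rfl

lemma ci_alt_eq_ref (a : List (List Int)) : ci_alt a = pvRef [] a := by
  show (a.foldl pvStepB ([], [], [])).2.2 = _
  exact pvBMain a [] [] [] (by simp) (fun p => by simp [pvCovers]) (fun lo hi => by simp [pvQuad])

-- ===== VERDICT (by name: the statement is the Claim_ definition above) =====
theorem ci_spec : Claim_equal_ci := by
  intro a _dom _pre
  unfold Spec_ci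
  rw [ci_eq_ref, ci_alt_eq_ref]
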